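-- pv_equiv track=rewrite | github.com/yejeeni/YeoBaek-Coding-Test-Study | 우새빛/14주차/[PGS]피로도_Lv2.py | solution2
-- ===== SOURCE A (Python) =====
-- from itertools import permutations
--
-- def solution2(k, dungeons):
--     answer = -1
--
--     #던전의 개수는 1이상 8이하 -> 순열로 모든 경우 나열
--     d_case = [list(p) for p in permutations(dungeons, len(dungeons))]
--
--     for dun in d_case:
--         temp_k = k
--         count = 0
--         for d in dun:
--             if temp_k >= d[0] :
--                 temp_k -= d[1] #최소 필요 피로도 보다 현재 피로도가 높다면 피로도를 소모(던전 탐험)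
--                 count += 1
--
--             if answer < count:
--                 answer = count
--
--     return answer
-- ===== SOURCE B (Python) =====
-- def solution2(k, dungeons):
--     # Recursive DFS over the remaining dungeons instead of materializing all
--     # permutations: prunes orders whose next dungeon is unaffordable.
--     def dfs(fatigue, rem):
--         best = 0
--         for i in range(len(rem)):
--             d = rem[i]
--             if fatigue >= d[0]:
--                 best = max(best, 1 + dfs(fatigue - d[1], rem[:i] + rem[i + 1:]))
--         return best
--     return dfs(k, dungeons)
-- ===== Notes on version B (the rewrite author's own statement) =====
-- stated objective: alternative
-- what changed: Replaces the materialized list of all n! permutations scanned greedily by a recursive DFS that only branches on currently affordable dungeons, pruning unreachable orders.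
-- intended difference: On an empty dungeon list A returns its -1 initial sentinel (the answer variable is never updated) while B returns 0, the number of dungeons actually visitable, which is the intended count. — e.g. on solution2(5, []): A returns -1, B returns 0
-- outside the precondition, e.g. on solution2(0, [[5]]): A returns 0, B returns 0
import Mathlib
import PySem

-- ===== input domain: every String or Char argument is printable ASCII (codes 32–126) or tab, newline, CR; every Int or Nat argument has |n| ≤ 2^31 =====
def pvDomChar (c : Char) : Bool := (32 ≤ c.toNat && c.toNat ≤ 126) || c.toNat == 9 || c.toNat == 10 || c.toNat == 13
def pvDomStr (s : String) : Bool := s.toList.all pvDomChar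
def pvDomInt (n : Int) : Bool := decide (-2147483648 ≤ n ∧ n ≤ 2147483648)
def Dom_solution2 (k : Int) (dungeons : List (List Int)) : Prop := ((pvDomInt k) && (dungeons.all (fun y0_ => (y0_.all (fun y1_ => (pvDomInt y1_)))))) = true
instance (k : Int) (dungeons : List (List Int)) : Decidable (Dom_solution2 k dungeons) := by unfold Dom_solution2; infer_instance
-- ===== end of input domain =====

-- B replaces the materialized list of all n! permutations by a recursive DFS that
-- only branches on currently affordable dungeons (objective: alternative algorithm).

-- ===== PORT A =====
-- itertools.permutations(dungeons, len(dungeons)) ported as List.permutations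
-- (same multiset of permutations; the fold's value does not depend on their order).
-- d[0]/d[1] are PySem.List.pyGet? with a .getD 0 default; Pre_ excludes the
-- inputs where Python would raise IndexError there.
def solution2 (k : Int) (dungeons : List (List Int)) : Int :=
  let d_case := dungeons.permutations
  d_case.foldl
    (fun answer dun =>
      (dun.foldl
        (fun (st : Int × Int × Int) d =>
          let st2 :=
            if st.1 ≥ (PySem.List.pyGet? d 0).getD 0 then
              (st.1 - (PySem.List.pyGet? d 1).getD 0, st.2.1 + 1)
            else (st.1, st.2.1)
          (st2.1, st2.2, if st.2.2 < st2.2 then st2.2 else st.2.2))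
        (k, 0, answer)).2.2)
    (-1)

-- ===== PORT B =====
-- fuel = rem.length makes the recursion structural; it is never exhausted
-- (each recursive call erases one element).
def solution2AltDfs (fuel : Nat) (fatigue : Int) (rem : List (List Int)) : Int :=
  match fuel with
  | 0 => 0
  | fuel + 1 =>
    (List.range rem.length).foldl
      (fun best i =>
        let d := (rem[i]?).getD []
        if fatigue ≥ (PySem.List.pyGet? d 0).getD 0 then
          max best (1 + solution2AltDfs fuel (fatigue - (PySem.List.pyGet? d 1).getD 0) (rem.eraseIdx i))
        else best)
      0

def solution2_alt (k : Int) (dungeons : List (List Int)) : Int :=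
  solution2AltDfs dungeons.length k dungeons

-- ===== PRECONDITION & SPEC =====
-- Pre_ excludes malformed dungeon entries with fewer than two fields ([need, cost]):
-- on those A usually raises IndexError (it can return only when such an entry is
-- never affordable, e.g. (0, [[5]]) where both A and B return 0); entries with at
-- least the two fields are the natural domain of the problem.
def Pre_solution2 (k : Int) (dungeons : List (List Int)) : Prop :=
  ∀ d ∈ dungeons, 2 ≤ d.length
instance (k : Int) (dungeons : List (List Int)) : Decidable (Pre_solution2 k dungeons) := by
  unfold Pre_solution2; infer_instance
def pvWitness_solution2 : Int × List (List Int) := (80, [[80, 20], [50, 40], [30, 10]])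

-- On an empty dungeon list A returns its -1 initial sentinel (the answer variable is
-- never updated) while B returns 0, the number of dungeons actually visitable, which
-- is the intended count.
def D_solution2 (k : Int) (dungeons : List (List Int)) : Prop := dungeons = []
instance (k : Int) (dungeons : List (List Int)) : Decidable (D_solution2 k dungeons) := by
  unfold D_solution2; infer_instance

def Spec_solution2 (k : Int) (dungeons : List (List Int)) (out : Int) : Prop :=
  ¬ D_solution2 k dungeons → out = solution2_alt k dungeons
instance (k : Int) (dungeons : List (List Int)) (out : Int) : Decidable (Spec_solution2 k dungeons out) := by
  unfold Spec_solution2; infer_instance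

def pvDiffWitness_solution2 : Int × List (List Int) := (5, [])
def pvDiffWitnessOut_solution2 : Int × Int := (-1, 0)

-- ===== CLAIM (what is proved, stated in full; the proofs are below) =====
def Claim_unchanged_solution2 : Prop := ∀ (k : Int) (dungeons : List (List Int)), Dom_solution2 k dungeons → Pre_solution2 k dungeons → Spec_solution2 k dungeons (solution2 k dungeons)
def Claim_changed_solution2 : Prop := Dom_solution2 (pvDiffWitness_solution2.1) (pvDiffWitness_solution2.2) ∧ Pre_solution2 (pvDiffWitness_solution2.1) (pvDiffWitness_solution2.2) ∧ D_solution2 (pvDiffWitness_solution2.1) (pvDiffWitness_solution2.2) ∧ solution2 (pvDiffWitness_solution2.1) (pvDiffWitness_solution2.2) = pvDiffWitnessOut_solution2.1 ∧ solution2_alt (pvDiffWitness_solution2.1) (pvDiffWitness_solution2.2) = pvDiffWitnessOut_solution2.2 ∧ pvDiffWitnessOut_solution2.1 ≠ pvDiffWitnessOut_solution2.2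
def Claim_exact_solution2 : Prop := ∀ (k : Int) (dungeons : List (List Int)), Dom_solution2 k dungeons → Pre_solution2 k dungeons → D_solution2 k dungeons → solution2 k dungeons ≠ solution2_alt k dungeons

-- ===== LEMMAS AND PROOFS =====

-- need / cost fields of a dungeon, as the ports read them
def pvD0 (d : List Int) : Int := (PySem.List.pyGet? d 0).getD 0
def pvD1 (d : List Int) : Int := (PySem.List.pyGet? d 1).getD 0

-- greedy count of A's inner loop along one fixed order
def pvG : Int → List (List Int) → Int
  | _, [] => 0
  | k, d :: ds => if k ≥ pvD0 d then 1 + pvG (k - pvD1 d) ds else pvG k ds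

-- the subsequence of dungeons the greedy scan actually visits
def pvPlay : Int → List (List Int) → List (List Int)
  | _, [] => []
  | k, d :: ds => if k ≥ pvD0 d then d :: pvPlay (k - pvD1 d) ds else pvPlay k ds

-- "every step of v is affordable in sequence"
def pvAll : Int → List (List Int) → Prop
  | _, [] => True
  | k, d :: ds => k ≥ pvD0 d ∧ pvAll (k - pvD1 d) ds

theorem pvG_nonneg (k : Int) (p : List (List Int)) : 0 ≤ pvG k p := by
  induction p generalizing k with
  | nil => simp [pvG]
  | cons d ds ih => simp only [pvG]; split <;> [linarith [ih (k - pvD1 d)]; exact ih k]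

theorem pvG_zero (k : Int) (p : List (List Int)) (h : ∀ d ∈ p, ¬ k ≥ pvD0 d) : pvG k p = 0 := by
  induction p with
  | nil => rfl
  | cons d ds ih =>
    simp only [pvG, if_neg (h d (by simp))]
    exact ih (fun d' hd' => h d' (by simp [hd']))

theorem pvG_play_length (k : Int) (p : List (List Int)) : pvG k p = ((pvPlay k p).length : Int) := by
  induction p generalizing k with
  | nil => rfl
  | cons d ds ih => simp only [pvG, pvPlay]; split <;> simp [ih] <;> ring

theorem pvPlay_sublist (k : Int) (p : List (List Int)) : (pvPlay k p).Sublist p := by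
  induction p generalizing k with
  | nil => simp [pvPlay]
  | cons d ds ih =>
    simp only [pvPlay]; split
    · exact List.Sublist.cons₂ d (ih _)
    · exact List.Sublist.cons d (ih _)

theorem pvAll_play (k : Int) (p : List (List Int)) : pvAll k (pvPlay k p) := by
  induction p generalizing k with
  | nil => trivial
  | cons d ds ih =>
    simp only [pvPlay]; split
    · exact ⟨by assumption, ih _⟩
    · exact ih _

-- generic lemmas about the fold `fun b x => if c x then max b (t x) else b`
theorem pvFold_init_le {α : Type} (c : α → Prop) [DecidablePred c] (t : α → Int) (xs : List α) (a : Int) :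
    a ≤ xs.foldl (fun b x => if c x then max b (t x) else b) a := by
  induction xs generalizing a with
  | nil => exact le_refl a
  | cons x xs ih =>
    simp only [List.foldl_cons]
    refine le_trans ?_ (ih _)
    split <;> simp

theorem pvFold_le_of_mem {α : Type} (c : α → Prop) [DecidablePred c] (t : α → Int) (xs : List α) (a : Int)
    {x : α} (hx : x ∈ xs) (hc : c x) :
    t x ≤ xs.foldl (fun b x => if c x then max b (t x) else b) a := by
  induction xs generalizing a with
  | nil => cases hx
  | cons y ys ih =>
    simp only [List.foldl_cons]
    rcases List.mem_cons.mp hx with rfl | hx'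
    · refine le_trans ?_ (pvFold_init_le c t ys _)
      simp [hc]
    · exact ih _ hx'

theorem pvFold_le {α : Type} (c : α → Prop) [DecidablePred c] (t : α → Int) (xs : List α) (a D : Int)
    (ha : a ≤ D) (h : ∀ x ∈ xs, c x → t x ≤ D) :
    xs.foldl (fun b x => if c x then max b (t x) else b) a ≤ D := by
  induction xs generalizing a with
  | nil => exact ha
  | cons x xs ih =>
    simp only [List.foldl_cons]
    apply ih
    · split
      · exact max_le ha (h x (by simp) (by assumption))
      · exact ha
    · exact fun y hy => h y (by simp [hy])

theorem pvFold_cases {α : Type} (c : α → Prop) [DecidablePred c] (t : α → Int) (xs : List α) (a : Int) :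
    xs.foldl (fun b x => if c x then max b (t x) else b) a = a ∨
    ∃ x ∈ xs, c x ∧ xs.foldl (fun b x => if c x then max b (t x) else b) a = t x := by
  induction xs generalizing a with
  | nil => exact Or.inl rfl
  | cons x xs ih =>
    simp only [List.foldl_cons]
    by_cases hc : c x
    · rw [if_pos hc]
      rcases ih (max a (t x)) with h | ⟨y, hy, hcy, hfy⟩
      · rcases max_choice a (t x) with hm | hm
        · exact Or.inl (h.trans hm)
        · exact Or.inr ⟨x, by simp, hc, h.trans hm⟩
      · exact Or.inr ⟨y, by simp [hy], hcy, hfy⟩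
    · rw [if_neg hc]
      rcases ih a with h | ⟨y, hy, hcy, hfy⟩
      · exact Or.inl h
      · exact Or.inr ⟨y, by simp [hy], hcy, hfy⟩

-- one unfolding step of the DFS, written with pvD0/pvD1
theorem pvDfs_succ (f : Nat) (k : Int) (l : List (List Int)) :
    solution2AltDfs (f + 1) k l =
    (List.range l.length).foldl
      (fun b i =>
        if k ≥ pvD0 ((l[i]?).getD []) then
          max b (1 + solution2AltDfs f (k - pvD1 ((l[i]?).getD [])) (l.eraseIdx i))
        else b)
      0 := rfl

theorem pvDfs_nonneg (fuel : Nat) (k : Int) (rem : List (List Int)) :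
    0 ≤ solution2AltDfs fuel k rem := by
  cases fuel with
  | zero => simp [solution2AltDfs]
  | succ f =>
    rw [pvDfs_succ]
    exact pvFold_init_le _ _ _ 0

theorem pvDfs_step_le (f : Nat) (k : Int) (l : List (List Int)) {i : Nat}
    (hi : i < l.length) (hc : k ≥ pvD0 ((l[i]?).getD [])) :
    1 + solution2AltDfs f (k - pvD1 ((l[i]?).getD [])) (l.eraseIdx i) ≤ solution2AltDfs (f + 1) k l := by
  rw [pvDfs_succ]
  exact pvFold_le_of_mem (fun i => k ≥ pvD0 ((l[i]?).getD []))
    (fun i => 1 + solution2AltDfs f (k - pvD1 ((l[i]?).getD [])) (l.eraseIdx i))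
    (List.range l.length) 0 (List.mem_range.mpr hi) hc

theorem pvDfs_cases (f : Nat) (k : Int) (l : List (List Int)) :
    solution2AltDfs (f + 1) k l = 0 ∨
    ∃ i ∈ List.range l.length, k ≥ pvD0 ((l[i]?).getD []) ∧
      solution2AltDfs (f + 1) k l =
        1 + solution2AltDfs f (k - pvD1 ((l[i]?).getD [])) (l.eraseIdx i) := by
  rw [pvDfs_succ]
  exact pvFold_cases (fun i => k ≥ pvD0 ((l[i]?).getD []))
    (fun i => 1 + solution2AltDfs f (k - pvD1 ((l[i]?).getD [])) (l.eraseIdx i))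
    (List.range l.length) 0

-- (a) any affordable-in-sequence sub-multiset of l is counted by the DFS
theorem pvUpper (v : List (List Int)) : ∀ (k : Int) (l : List (List Int)) (fuel : Nat),
    pvAll k v → v.Subperm l → l.length ≤ fuel →
    (v.length : Int) ≤ solution2AltDfs fuel k l := by
  induction v with
  | nil => intro k l fuel _ _ _; simpa using pvDfs_nonneg fuel k l
  | cons d vs ih =>
    intro k l fuel hall hsub hfuel
    have hd : d ∈ l := hsub.subset (by simp)
    obtain ⟨i, hi, hget⟩ := List.mem_iff_getElem.mp hd
    have hdi : (l[i]?).getD [] = d := by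
      rw [List.getElem?_eq_getElem hi]; simpa using hget
    have hperm : l.Perm (d :: l.eraseIdx i) := by
      have := (List.getElem_cons_eraseIdx_perm hi).symm
      rwa [hget] at this
    have hsub' : vs.Subperm (l.eraseIdx i) :=
      (List.subperm_cons d).mp (hsub.trans hperm.subperm)
    obtain ⟨f, rfl⟩ : ∃ f, fuel = f + 1 := by
      cases fuel with
      | zero => omega
      | succ f => exact ⟨f, rfl⟩
    have hlenE : (l.eraseIdx i).length ≤ f := by
      rw [List.length_eraseIdx]; simp [hi]; omega
    have hIH := ih (k - pvD1 d) (l.eraseIdx i) f hall.2 hsub' hlenE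
    have hstep := pvDfs_step_le f k l hi (by rw [hdi]; exact hall.1)
    rw [hdi] at hstep
    simp only [List.length_cons]
    push_cast
    omega

-- corollary: the greedy count of any order of l is at most the DFS value
theorem pvUpperG (k : Int) (p l : List (List Int)) (fuel : Nat)
    (hperm : p.Perm l) (hfuel : l.length ≤ fuel) :
    pvG k p ≤ solution2AltDfs fuel k l := by
  rw [pvG_play_length]
  exact pvUpper (pvPlay k p) k l fuel (pvAll_play k p)
    (((pvPlay_sublist k p).subperm).trans hperm.subperm) hfuel

-- (b) the DFS value is achieved by some order of l
theorem pvExists (fuel : Nat) : ∀ (l : List (List Int)) (k : Int), l.length ≤ fuel →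
    ∃ p, p.Perm l ∧ pvG k p = solution2AltDfs fuel k l := by
  induction fuel with
  | zero =>
    intro l k hl
    have : l = [] := List.length_eq_zero_iff.mp (Nat.le_zero.mp hl)
    subst this
    exact ⟨[], List.Perm.refl _, rfl⟩
  | succ f ih =>
    intro l k hl
    rcases pvDfs_cases f k l with h | ⟨i, hi, hci, hfi⟩
    · -- DFS value 0 : no dungeon is affordable at k, any order scores 0
      refine ⟨l, List.Perm.refl _, ?_⟩
      rw [h]
      apply pvG_zero
      intro d hd hk
      obtain ⟨j, hj, hget⟩ := List.mem_iff_getElem.mp hd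
      have hdj : (l[j]?).getD [] = d := by rw [List.getElem?_eq_getElem hj]; simpa using hget
      have hle := pvDfs_step_le f k l hj (by rw [hdj]; exact hk)
      rw [h] at hle
      have h0 := pvDfs_nonneg f (k - pvD1 ((l[j]?).getD [])) (l.eraseIdx j)
      omega
    · have hi' : i < l.length := List.mem_range.mp hi
      have hdi : l[i] = (l[i]?).getD [] := by rw [List.getElem?_eq_getElem hi']; rfl
      have hlenE : (l.eraseIdx i).length ≤ f := by
        rw [List.length_eraseIdx]; simp [hi']; omega
      obtain ⟨p', hp', hg'⟩ := ih (l.eraseIdx i) (k - pvD1 ((l[i]?).getD [])) hlenE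
      refine ⟨(l[i]?).getD [] :: p', ?_, ?_⟩
      · have h1 : l.Perm (l[i] :: l.eraseIdx i) := (List.getElem_cons_eraseIdx_perm hi').symm
        rw [hdi] at h1
        exact (List.Perm.cons _ hp').trans h1.symm
      · rw [hfi]
        simp only [pvG, if_pos hci]
        rw [hg']

-- fold of max over a list where every value is ≤ D and some value equals D
theorem pvFoldMax_eq {α : Type} (f : α → Int) (xs : List α) (a D : Int)
    (hle : ∀ x ∈ xs, f x ≤ D) (hex : ∃ x ∈ xs, f x = D) (ha : a ≤ D) :
    xs.foldl (fun b x => max b (f x)) a = D := by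
  have h1 : xs.foldl (fun b x => max b (f x)) a ≤ D := by
    have := pvFold_le (fun _ => True) f xs a D ha (fun x hx _ => hle x hx)
    simpa using this
  obtain ⟨x, hx, hfx⟩ := hex
  have h2 : D ≤ xs.foldl (fun b x => max b (f x)) a := by
    have := pvFold_le_of_mem (fun _ => True) f xs a hx trivial
    rw [hfx] at this
    simpa using this
  omega

-- A's inner loop computes `max answer (count + greedy score)` (or leaves answer on [])
theorem pvInner (p : List (List Int)) : ∀ (tk c a : Int),
    (p.foldl
      (fun (st : Int × Int × Int) d =>
        let st2 :=
          if st.1 ≥ (PySem.List.pyGet? d 0).getD 0 then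
            (st.1 - (PySem.List.pyGet? d 1).getD 0, st.2.1 + 1)
          else (st.1, st.2.1)
        (st2.1, st2.2, if st.2.2 < st2.2 then st2.2 else st.2.2))
      (tk, c, a)).2.2 = if p = [] then a else max a (c + pvG tk p) := by
  induction p with
  | nil => intro tk c a; rfl
  | cons d ds ih =>
    intro tk c a
    simp only [List.foldl_cons]
    by_cases hk : tk ≥ (PySem.List.pyGet? d 0).getD 0
    · simp only [if_pos hk]
      rw [ih]
      have hg : pvG tk (d :: ds) = 1 + pvG (tk - (PySem.List.pyGet? d 1).getD 0) ds := by
        simp [pvG, pvD0, pvD1, hk]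
      rw [hg, if_neg (List.cons_ne_nil d ds)]
      rcases eq_or_ne ds [] with rfl | hds
      · simp only [if_pos rfl]
        have h0 : pvG (tk - (PySem.List.pyGet? d 1).getD 0) ([] : List (List Int)) = 0 := rfl
        rw [h0]
        split_ifs <;> omega
      · rw [if_neg hds]
        have := pvG_nonneg (tk - (PySem.List.pyGet? d 1).getD 0) ds
        split_ifs <;> omega
    · simp only [if_neg hk]
      rw [ih]
      have hg : pvG tk (d :: ds) = pvG tk ds := by simp [pvG, pvD0, hk]
      rw [hg, if_neg (List.cons_ne_nil d ds)]
      rcases eq_or_ne ds [] with rfl | hds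
      · simp only [if_pos rfl]
        have h0 : pvG tk ([] : List (List Int)) = 0 := rfl
        rw [h0]
        split_ifs <;> omega
      · rw [if_neg hds]
        have := pvG_nonneg tk ds
        split_ifs <;> omega

-- ===== VERDICT (by name: the statement is the Claim_ definition above) =====
theorem solution2_spec : Claim_unchanged_solution2 := by
  intro k dungeons _hdom _hpre hD
  unfold D_solution2 at hD
  show solution2 k dungeons = solution2_alt k dungeons
  have hne : ∀ p ∈ dungeons.permutations, p ≠ [] := by
    intro p hp hpe
    subst hpe
    exact hD (List.Perm.nil_eq (List.mem_permutations.mp hp)).symm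
  simp only [solution2, solution2_alt]
  have hstep : List.foldl (fun (answer : Int) (dun : List (List Int)) =>
      (List.foldl (fun (st : Int × Int × Int) d =>
          let st2 := if st.1 ≥ (PySem.List.pyGet? d 0).getD 0 then
              (st.1 - (PySem.List.pyGet? d 1).getD 0, st.2.1 + 1) else (st.1, st.2.1)
          (st2.1, st2.2, if st.2.2 < st2.2 then st2.2 else st.2.2)) (k, 0, answer) dun).2.2)
      (-1) dungeons.permutations
    = List.foldl (fun (answer : Int) (p : List (List Int)) => max answer (pvG k p)) (-1) dungeons.permutations := by
    apply PySem.List.foldl_congr_mem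
    intro a p hp
    have h := pvInner p k 0 a
    rw [if_neg (hne p hp), zero_add] at h
    exact h
  have hmain : List.foldl (fun (answer : Int) (p : List (List Int)) => max answer (pvG k p)) (-1) dungeons.permutations
      = solution2AltDfs dungeons.length k dungeons := by
    apply pvFoldMax_eq
    · intro p hp
      exact pvUpperG k p dungeons dungeons.length (List.mem_permutations.mp hp) (le_refl _)
    · obtain ⟨p, hp, hg⟩ := pvExists dungeons.length dungeons k (le_refl _)
      exact ⟨p, List.mem_permutations.mpr hp, hg⟩
    · have := pvDfs_nonneg dungeons.length k dungeons
      omega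
  exact hstep.trans hmain

theorem solution2_changed : Claim_changed_solution2 := by
  unfold Claim_changed_solution2
  refine ⟨by decide, by decide, rfl, ?_, by decide, by decide⟩
  show solution2 5 [] = -1
  simp [solution2, List.permutations_nil]

theorem solution2_tight : Claim_exact_solution2 := by
  intro k dungeons _hdom _hpre hD
  unfold D_solution2 at hD
  subst hD
  simp [solution2, solution2_alt, solution2AltDfs, List.permutations_nil]
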